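-- pv_equiv track=rewrite | github.com/L1m3Kun/BaekJoon | phase_11/test_print_star.py | print_Star
-- ===== SOURCE A (Python) =====
-- def print_Star(n):
-- 	if n < 3:
-- 		return ["*"]
--
-- 	num = n // 3
--
-- 	s = print_Star(num)
-- 	result = []
--
-- 	for i in s:
-- 		result.append(i * 3)
-- 		result.append(i + " " * num + i)
-- 		result.append(i * 3)
--
--
-- 	# for i in s:
--
--
-- 	# for i in s:
--
--
-- 	return result
-- ===== SOURCE B (Python) =====
-- def print_Star(n):
--     if n < 3:
--         return ["*"]
--     # collect per-level paddings outermost-first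
--     nums = []
--     m = n
--     while m >= 3:
--         num = m // 3
--         nums.append(num)
--         m = num
--     result = ["*"]
--     for num in reversed(nums):  # innermost first
--         new = []
--         for i in result:
--             new.append(i * 3)
--             new.append(i + " " * num + i)
--             new.append(i * 3)
--         result = new
--     return result
-- ===== Notes on version B (the rewrite author's own statement) =====
-- stated objective: alternative
-- what changed: Replaces the recursion with an iterative two-phase algorithm: first collect the per-level padding widths by repeated floor division in a list, then expand the single-star row level by level, applying the collected paddings innermost-first.
import Mathlib
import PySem

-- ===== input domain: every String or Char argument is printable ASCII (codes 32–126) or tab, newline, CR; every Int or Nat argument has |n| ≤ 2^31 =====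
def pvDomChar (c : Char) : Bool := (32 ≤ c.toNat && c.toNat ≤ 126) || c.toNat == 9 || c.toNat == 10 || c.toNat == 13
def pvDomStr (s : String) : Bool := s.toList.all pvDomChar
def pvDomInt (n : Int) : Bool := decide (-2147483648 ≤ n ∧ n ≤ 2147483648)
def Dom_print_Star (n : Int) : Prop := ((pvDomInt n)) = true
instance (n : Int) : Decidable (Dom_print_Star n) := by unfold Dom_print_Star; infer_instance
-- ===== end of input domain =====

-- B collects the per-level paddings iteratively and expands ['*'] innermost-first
-- instead of recursing; same algorithmic cost, different decomposition.

-- termination helper for both ports: n // 3 strictly shrinks toNat for n ≥ 3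
theorem pvFloordiv3_toNat_lt (n : Int) (h : ¬ n < 3) :
    (PySem.Int.floordiv n 3).toNat < n.toNat := by
  have h3 : (0:Int) < 3 := by norm_num
  have hlt : PySem.Int.floordiv n 3 < n := by
    rw [PySem.Int.floordiv_lt_iff_lt_mul h3]; omega
  have hge : (0:Int) ≤ PySem.Int.floordiv n 3 := by
    rw [PySem.Int.le_floordiv_iff_mul_le h3]
    omega
  omega

-- ===== PORT A =====
def print_Star (n : Int) : List String :=
  if h : n < 3 then ["*"]
  else
    let num := PySem.Int.floordiv n 3
    let s := print_Star num
    s.foldl (fun result i =>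
      result ++ [String.ofList (PySem.List.pyRepeat i.toList 3),
                 String.ofList (i.toList ++ PySem.List.pyRepeat [' '] num ++ i.toList),
                 String.ofList (PySem.List.pyRepeat i.toList 3)]) []
termination_by n.toNat
decreasing_by exact pvFloordiv3_toNat_lt n h

-- ===== PORT B =====
-- while m >= 3: num = m // 3; nums.append(num); m = num
def pvCollectNums (m : Int) : List Int :=
  if h : m < 3 then []
  else
    let num := PySem.Int.floordiv m 3
    num :: pvCollectNums num
termination_by m.toNat
decreasing_by exact pvFloordiv3_toNat_lt m h

def print_Star_alt (n : Int) : List String :=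
  if n < 3 then ["*"]
  else
    (pvCollectNums n).reverse.foldl
      (fun result num =>
        result.foldl (fun new i =>
          new ++ [String.ofList (PySem.List.pyRepeat i.toList 3),
                  String.ofList (i.toList ++ PySem.List.pyRepeat [' '] num ++ i.toList),
                  String.ofList (PySem.List.pyRepeat i.toList 3)]) [])
      ["*"]

-- ===== PRECONDITION & SPEC =====
def Spec_print_Star (n : Int) (out : List String) : Prop := out = print_Star_alt n
instance (n : Int) (out : List String) : Decidable (Spec_print_Star n out) := by unfold Spec_print_Star; infer_instance

-- ===== CLAIM (what is proved, stated in full; the proofs are below) =====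
def Claim_equal_print_Star : Prop := ∀ (n : Int), Dom_print_Star n → Spec_print_Star n (print_Star n)

-- ===== LEMMAS AND PROOFS =====

-- the expansion step both ports perform on one level
def pvStep (num : Int) (result : List String) : List String :=
  result.foldl (fun new i =>
    new ++ [String.ofList (PySem.List.pyRepeat i.toList 3),
            String.ofList (i.toList ++ PySem.List.pyRepeat [' '] num ++ i.toList),
            String.ofList (PySem.List.pyRepeat i.toList 3)]) []

theorem pvKey (n : Int) :
    (pvCollectNums n).reverse.foldl (fun result num => pvStep num result) ["*"] = print_Star n := by
  rw [pvCollectNums, print_Star]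
  by_cases h : n < 3
  · simp [h]
  · simp only [h, dite_false, if_neg h, List.reverse_cons, List.foldl_append, List.foldl_cons,
      List.foldl_nil]
    rw [pvKey (PySem.Int.floordiv n 3)]
    rfl
termination_by n.toNat
decreasing_by exact pvFloordiv3_toNat_lt n h

-- ===== VERDICT (by name: the statement is the Claim_ definition above) =====
theorem print_Star_spec : Claim_equal_print_Star := by
  intro n _
  unfold Spec_print_Star print_Star_alt
  by_cases h : n < 3
  · simp [h, print_Star]
  · simp only [if_neg h]
    exact (pvKey n).symm
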